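-- pv_equiv track=rewrite | github.com/lilin12123/vocabulary_mining | EnLearning/web_game/app.py | _pick_similar_meanings
-- ===== SOURCE A (Python) =====
-- from typing import Any, Dict, List, Optional
--
-- def _pick_similar_meanings(correct: str, pool: List[str], k: int) -> List[str]:
--     correct_chars = set(correct)
--     candidates = []
--     for meaning in pool:
--         if meaning == correct:
--             continue
--         overlap = len(correct_chars.intersection(set(meaning)))
--         candidates.append((overlap, meaning))
--     candidates.sort(key=lambda x: x[0], reverse=True)
--     picked = []
--     for _, meaning in candidates:
--         if meaning not in picked:
--             picked.append(meaning)
--         if len(picked) >= k: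
--             break
--     return picked
-- ===== SOURCE B (Python) =====
-- from typing import List
--
-- def _pick_similar_meanings(correct: str, pool: List[str], k: int) -> List[str]:
--     correct_chars = set(correct)
--     n = len(correct_chars)
--     # bucket the non-correct meanings by overlap score (0..n), keeping pool order
--     buckets = {}
--     for meaning in pool:
--         if meaning == correct:
--             continue
--         overlap = len(correct_chars & set(meaning))
--         buckets[overlap] = buckets.get(overlap, []) + [meaning]
--     picked = []
--     for overlap in range(n, -1, -1):
--         for meaning in buckets.get(overlap, []):
--             if meaning not in picked:
--                 picked.append(meaning)
--             if len(picked) >= k: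
--                 return picked
--     return picked
-- ===== Notes on version B (the rewrite author's own statement) =====
-- stated objective: alternative
-- what changed: Replaces the stable descending sort of (overlap, meaning) pairs by a dict of score buckets filled in pool order and scanned from the highest possible overlap down to 0, with the same dedup/break pick loop.
import Mathlib
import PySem

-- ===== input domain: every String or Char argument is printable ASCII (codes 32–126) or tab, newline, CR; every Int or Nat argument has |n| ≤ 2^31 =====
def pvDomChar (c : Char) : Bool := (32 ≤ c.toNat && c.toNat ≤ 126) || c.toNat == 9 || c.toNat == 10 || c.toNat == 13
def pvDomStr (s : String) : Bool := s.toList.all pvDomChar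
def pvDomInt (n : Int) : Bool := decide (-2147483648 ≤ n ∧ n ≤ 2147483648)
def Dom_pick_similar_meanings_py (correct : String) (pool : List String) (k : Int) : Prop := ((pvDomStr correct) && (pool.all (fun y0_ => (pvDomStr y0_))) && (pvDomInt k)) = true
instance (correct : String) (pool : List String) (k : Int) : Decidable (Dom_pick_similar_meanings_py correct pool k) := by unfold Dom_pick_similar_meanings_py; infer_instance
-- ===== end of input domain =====

-- B replaces A's stable descending sort by a dict of score buckets scanned from the top score down (alternative decomposition, same results).

-- ===== PORT A =====
-- overlap = len(set(correct) & set(meaning)), shared by both ports (same expression in both Pythons)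
def ovScore (cs : PySem.Set Char) (m : String) : Int :=
  PySem.Set.len (PySem.Set.inter cs (PySem.Set.ofList m.toList))

-- A's pick loop: append if not yet picked, then break once len(picked) >= k
def pickA : List (Int × String) → List String → Int → List String
  | [], picked, _ => picked
  | (_, m) :: rest, picked, k =>
    let p := if picked.contains m then picked else picked ++ [m]
    if k ≤ (p.length : Int) then p else pickA rest p k

def pick_similar_meanings_py (correct : String) (pool : List String) (k : Int) : List String :=
  let correct_chars := PySem.Set.ofList correct.toList
  let candidates := pool.foldl
    (fun acc m => if m == correct then acc else acc ++ [(ovScore correct_chars m, m)]) []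
  pickA (PySem.List.sorted candidates (fun x => x.1) true) [] k

-- ===== PORT B =====
-- inner loop over one bucket; the Bool records Python's early 'return picked'
def pickInner : List String → List String → Int → List String × Bool
  | [], picked, _ => (picked, false)
  | m :: ms, picked, k =>
    let p := if picked.contains m then picked else picked ++ [m]
    if k ≤ (p.length : Int) then (p, true) else pickInner ms p k

-- outer loop over the descending overlap values
def pickOuter (buckets : PySem.Dict Int (List String)) : List Int → List String → Int → List String
  | [], picked, _ => picked
  | v :: vs, picked, k =>
    match pickInner (buckets.getD v []) picked k with
    | (p, true) => p
    | (p, false) => pickOuter buckets vs p k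

def pick_similar_meanings_py_alt (correct : String) (pool : List String) (k : Int) : List String :=
  let correct_chars := PySem.Set.ofList correct.toList
  let n := PySem.Set.len correct_chars
  let buckets := pool.foldl
    (fun d m => if m == correct then d
                else d.modify (ovScore correct_chars m) [] (fun b => b ++ [m]))
    PySem.Dict.empty
  pickOuter buckets (PySem.List.pyRange n (-1) (-1)) [] k

-- ===== PRECONDITION & SPEC =====
def Spec_pick_similar_meanings_py (correct : String) (pool : List String) (k : Int) (out : List String) : Prop := out = pick_similar_meanings_py_alt correct pool k
instance (correct : String) (pool : List String) (k : Int) (out : List String) : Decidable (Spec_pick_similar_meanings_py correct pool k out) := by unfold Spec_pick_similar_meanings_py; infer_instance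

-- ===== CLAIM (what is proved, stated in full; the proofs are below) =====
def Claim_equal_pick_similar_meanings_py : Prop := ∀ (correct : String) (pool : List String) (k : Int), Dom_pick_similar_meanings_py correct pool k → Spec_pick_similar_meanings_py correct pool k (pick_similar_meanings_py correct pool k)

-- ===== LEMMAS AND PROOFS =====

-- descending bucket concatenation: filter(key = w) ++ … ++ filter(key = 0)
def Hbuck : Nat → List (Int × String) → List (Int × String)
  | 0, l => l.filter (fun p => p.1 == (0 : Int))
  | w+1, l => l.filter (fun p => p.1 == ((w : Int) + 1)) ++ Hbuck w l

theorem hbuck_nil (w : Nat) : Hbuck w [] = [] := by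
  induction w with
  | zero => simp [Hbuck]
  | succ w ih => simp [Hbuck, ih]

theorem mem_hbuck (w : Nat) (l : List (Int × String)) (y : Int × String) (hy : y ∈ Hbuck w l) :
    0 ≤ y.1 ∧ y.1 ≤ (w : Int) := by
  induction w with
  | zero =>
    simp only [Hbuck, List.mem_filter, beq_iff_eq] at hy
    simp [hy.2]
  | succ w ih =>
    simp only [Hbuck, List.mem_append, List.mem_filter, beq_iff_eq] at hy
    rcases hy with ⟨-, h⟩ | h
    · constructor <;> push_cast <;> omega
    · have := ih h; constructor <;> push_cast <;> omega

theorem hbuck_append_gt (w : Nat) (l : List (Int × String)) (x : Int × String)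
    (hx : (w : Int) < x.1) : Hbuck w (l ++ [x]) = Hbuck w l := by
  induction w with
  | zero =>
    simp only [Hbuck, List.filter_append, List.filter_cons, List.filter_nil]
    have : (x.1 == (0 : Int)) = false := by simp; omega
    simp [this]
  | succ w ih =>
    have hx' : (w : Int) < x.1 := by push_cast at hx ⊢; omega
    simp only [Hbuck, List.filter_append, List.filter_cons, List.filter_nil]
    have : (x.1 == ((w : Int) + 1)) = false := by simp; push_cast at hx; omega
    simp [this, ih hx']

theorem insertBy_append_left (bef : (Int × String) → (Int × String) → Bool) (x : Int × String)
    (A B : List (Int × String)) (h : ∀ y ∈ A, bef x y = false) :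
    PySem.List.insertBy bef x (A ++ B) = A ++ PySem.List.insertBy bef x B := by
  induction A with
  | nil => simp
  | cons a A ih =>
    have ha : bef x a = false := h a (by simp)
    have hih := ih (fun y hy => h y (by simp [hy]))
    simp only [List.cons_append]
    rw [show PySem.List.insertBy bef x (a :: (A ++ B)) = a :: PySem.List.insertBy bef x (A ++ B)
      from by simp [PySem.List.insertBy, ha], hih]

theorem insertBy_front (bef : (Int × String) → (Int × String) → Bool) (x : Int × String)
    (B : List (Int × String)) (h : ∀ y ∈ B, bef x y = true) :
    PySem.List.insertBy bef x B = x :: B := by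
  cases B with
  | nil => simp [PySem.List.insertBy]
  | cons b bs => simp [PySem.List.insertBy, h b (by simp)]

theorem ins_hbuck (w : Nat) (x : Int × String) (l : List (Int × String))
    (h0 : 0 ≤ x.1) (hw : x.1 ≤ (w : Int)) :
    PySem.List.insertBy (fun a b => decide (b.1 < a.1)) x (Hbuck w l) = Hbuck w (l ++ [x]) := by
  induction w with
  | zero =>
    have hx0 : x.1 = 0 := by simpa using le_antisymm hw h0
    rw [PySem.List.insertBy_of_forall_not_before]
    · simp [Hbuck, List.filter_append, hx0]
    · intro y hy
      have := mem_hbuck 0 l y hy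
      simp; omega

  | succ w ih =>
    by_cases hle : x.1 ≤ (w : Int)
    · -- x skips the top bucket, inserts into the rest
      rw [Hbuck, insertBy_append_left _ _ _ _ ?_, ih hle]
      · have hne : (x.1 == ((w : Int) + 1)) = false := by simp; omega
        simp [Hbuck, List.filter_append, hne]
      · intro y hy
        obtain ⟨-, hy2⟩ := List.mem_filter.mp hy
        simp only [beq_iff_eq] at hy2
        simp; omega
    · -- x.1 = w+1: lands at the end of the top bucket, i.e. in front of the rest
      have hx : x.1 = (w : Int) + 1 := by push_cast at hw; omega
      rw [Hbuck, insertBy_append_left _ _ _ _ ?_, insertBy_front _ _ _ ?_]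
      · simp [Hbuck, List.filter_append, hx, hbuck_append_gt w l x (by omega)]
      · intro y hy
        have h1 := (mem_hbuck w l y hy).2
        simp; omega
      · intro y hy
        obtain ⟨-, hy2⟩ := List.mem_filter.mp hy
        simp only [beq_iff_eq] at hy2
        simp; omega

theorem sorted_eq_hbuck (w : Nat) (l : List (Int × String))
    (h : ∀ p ∈ l, 0 ≤ p.1 ∧ p.1 ≤ (w : Int)) :
    PySem.List.sorted l (fun x => x.1) true = Hbuck w l := by
  rw [PySem.List.sorted_rev_eq_foldl_insertBy]
  induction l using List.reverseRecOn with
  | nil => simp [hbuck_nil]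
  | append_singleton t x ih =>
    rw [List.foldl_append, List.foldl_cons, List.foldl_nil,
      ih (fun p hp => h p (by simp [hp])),
      ins_hbuck w x t (h x (by simp)).1 (h x (by simp)).2]

-- folding a "skip or append" loop is filter + map
theorem foldl_skip_append {α : Type} (correct : String) (g : String → α)
    (pool : List String) (acc : List α) :
    pool.foldl (fun acc m => if m == correct then acc else acc ++ [g m]) acc
      = acc ++ (pool.filter (fun m => !(m == correct))).map g := by
  induction pool generalizing acc with
  | nil => simp
  | cons m pool ih =>
    rw [List.foldl_cons, List.filter_cons]
    by_cases hm : m = correct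
    · rw [if_pos (by simp [hm]), if_neg (show ¬(!(m == correct)) = true by simp [hm])]
      exact ih acc
    · rw [if_neg (by simp [hm]), if_pos (show (!(m == correct)) = true by simp [hm]),
        List.map_cons, ih]
      simp

-- folding a "skip or update" loop is folding over the filtered list
theorem foldl_skip_gen {α : Type} (correct : String) (g : α → String → α)
    (pool : List String) (d : α) :
    pool.foldl (fun d m => if m == correct then d else g d m) d
      = (pool.filter (fun m => !(m == correct))).foldl g d := by
  induction pool generalizing d with
  | nil => simp
  | cons m pool ih =>
    rw [List.foldl_cons, List.filter_cons]
    by_cases hm : m = correct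
    · rw [if_pos (by simp [hm]), if_neg (show ¬(!(m == correct)) = true by simp [hm])]
      exact ih d
    · rw [if_neg (by simp [hm]), if_pos (show (!(m == correct)) = true by simp [hm]),
        List.foldl_cons]
      exact ih (g d m)

-- proof-side pick loop over bare meanings
def pickM : List String → List String → Int → List String
  | [], picked, _ => picked
  | m :: ms, picked, k =>
    let p := if picked.contains m then picked else picked ++ [m]
    if k ≤ (p.length : Int) then p else pickM ms p k

theorem pickA_eq_pickM (l : List (Int × String)) (picked : List String) (k : Int) :
    pickA l picked k = pickM (l.map (fun p => p.2)) picked k := by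
  induction l generalizing picked with
  | nil => rfl
  | cons p l ih =>
    obtain ⟨v, m⟩ := p
    simp only [pickA, pickM, List.map_cons]
    split <;> simp [ih]

theorem pickM_append (b rest picked : List String) (k : Int) :
    pickM (b ++ rest) picked k
      = (match pickInner b picked k with
         | (p, true) => p
         | (p, false) => pickM rest p k) := by
  induction b generalizing picked with
  | nil => rfl
  | cons m ms ih =>
    by_cases hk : k ≤ (((if picked.contains m then picked else picked ++ [m]).length : Int))
    · simp only [List.cons_append, pickM, pickInner, if_pos hk]
    · simp only [List.cons_append, pickM, pickInner, if_neg hk]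
      exact ih _

theorem pickOuter_eq_pickM (d : PySem.Dict Int (List String)) (vs : List Int)
    (picked : List String) (k : Int) :
    pickOuter d vs picked k = pickM (vs.flatMap (fun v => d.getD v [])) picked k := by
  induction vs generalizing picked with
  | nil => rfl
  | cons v vs ih =>
    rw [List.flatMap_cons, pickM_append, pickOuter]
    cases h : pickInner (d.getD v []) picked k with
    | mk p stop => cases stop <;> simp [ih]

theorem pyRange_flatMap_eq_hbuck (n : Nat) (l : List (Int × String)) :
    (PySem.List.pyRange (n : Int) (-1) (-1)).flatMap (fun v => l.filter (fun p => p.1 == v))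
      = Hbuck n l := by
  induction n with
  | zero =>
    rw [PySem.List.pyRange_neg_one_cons (by norm_num),
      PySem.List.pyRange_neg_one_eq_nil (by norm_num)]
    simp [Hbuck]
  | succ n ih =>
    rw [PySem.List.pyRange_neg_one_cons (by push_cast; omega)]
    simp only [List.flatMap_cons]
    push_cast
    rw [show ((n : Int) + 1 - 1) = (n : Int) by ring, ih]
    simp [Hbuck]

-- the overlap score is between 0 and len(set(correct))
theorem ovScore_bounds (cs : PySem.Set Char) (m : String) :
    0 ≤ ovScore cs m ∧ ovScore cs m ≤ (cs.length : Int) := by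
  unfold ovScore PySem.Set.len PySem.Set.inter
  constructor
  · positivity
  · exact_mod_cast List.length_filter_le _ _

-- ===== VERDICT (by name: the statement is the Claim_ definition above) =====
theorem pick_similar_meanings_py_spec : Claim_equal_pick_similar_meanings_py := by
  intro correct pool k _
  unfold Spec_pick_similar_meanings_py pick_similar_meanings_py pick_similar_meanings_py_alt
  dsimp only
  set cs := PySem.Set.ofList correct.toList with hcs
  set cand := (pool.filter (fun m => !(m == correct))).map (fun m => (ovScore cs m, m)) with hcand
  -- A side
  rw [foldl_skip_append, List.nil_append, pickA_eq_pickM,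
    sorted_eq_hbuck cs.length _ ?hb]
  case hb =>
    intro p hp
    simp only [List.mem_map] at hp
    obtain ⟨m, _, rfl⟩ := hp
    exact ovScore_bounds cs m
  -- B side
  rw [foldl_skip_gen, pickOuter_eq_pickM]
  have hbkt : ∀ v : Int,
      ((pool.filter (fun m => !(m == correct))).foldl
        (fun d m => d.modify (ovScore cs m) [] (fun b => b ++ [m])) PySem.Dict.empty).getD v []
        = (cand.filter (fun p => p.1 == v)).map (fun p => p.2) := by
    intro v
    rw [hcand, show ((pool.filter (fun m => !(m == correct))).foldl
        (fun d m => d.modify (ovScore cs m) [] (fun b => b ++ [m])) PySem.Dict.empty)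
      = (((pool.filter (fun m => !(m == correct))).map (fun m => (ovScore cs m, m))).foldl
        (fun d p => d.modify p.1 [] (fun b => b ++ [p.2])) PySem.Dict.empty) from by
        rw [List.foldl_map]]
    rw [PySem.Dict.getD_foldl_modify_append]
    simp [PySem.Dict.getD_empty]
  have : (PySem.List.pyRange (PySem.Set.len cs) (-1) (-1)).flatMap
      (fun v => ((pool.filter (fun m => !(m == correct))).foldl
        (fun d m => d.modify (ovScore cs m) [] (fun b => b ++ [m])) PySem.Dict.empty).getD v [])
      = (Hbuck cs.length cand).map (fun p => p.2) := by
    simp only [hbkt]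
    rw [← List.map_flatMap]
    rw [show PySem.Set.len cs = ((cs.length : Nat) : Int) from rfl]
    rw [pyRange_flatMap_eq_hbuck]
  rw [this]
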